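-- pv_equiv track=rewrite | github.com/wdhorton/chessiq | chessiq/opening_analyzer/command.py | convert_fen_back
-- ===== SOURCE A (Python) =====
-- def convert_fen_back(fen):
--     out = []
--     count = 0
--     for ch in fen:
--         if ch == '-':
--             count += 1
--         else:
--             if count > 0:
--                 out.append(str(count))
--                 count = 0
--             out.append(ch)
--
--     if count > 0:
--         out.append(str(count))
--     return ''.join(out).split(' ')[0]
-- ===== SOURCE B (Python) =====
-- def convert_fen_back(fen):
--     board = fen.split(' ')[0]
--     for n in range(len(board), 0, -1):
--         board = board.replace('-' * n, str(n))
--     return board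
-- ===== Notes on version B (the rewrite author's own statement) =====
-- stated objective: alternative
-- what changed: Replaces A's single-pass per-character dash-counting state machine by staged global text substitution: split off the board at the first space first, then for run lengths n from len(board) down to 1 replace every n-dash substring by str(n); correct because runs are replaced longest-first, so each maximal dash run of length k is rewritten exactly once, at stage n=k.
import Mathlib
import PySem

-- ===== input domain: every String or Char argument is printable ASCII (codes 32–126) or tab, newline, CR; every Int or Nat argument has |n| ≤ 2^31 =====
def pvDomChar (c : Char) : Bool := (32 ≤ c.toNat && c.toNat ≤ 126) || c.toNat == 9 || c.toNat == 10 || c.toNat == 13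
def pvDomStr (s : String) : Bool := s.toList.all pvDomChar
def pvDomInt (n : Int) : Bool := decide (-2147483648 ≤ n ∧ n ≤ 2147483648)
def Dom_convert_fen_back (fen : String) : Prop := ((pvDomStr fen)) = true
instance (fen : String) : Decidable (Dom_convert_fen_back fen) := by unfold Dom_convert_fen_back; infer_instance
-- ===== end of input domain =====

-- B replaces A's per-character dash-counting state machine by staged global substitution:
-- split off the board at the first space, then replace dash runs longest-first with str.replace.

-- ===== PORT A =====
-- one loop step of A: dash bumps the counter, anything else flushes the counter then appends the char
def aStep (st : List String × Int) (ch : Char) : List String × Int :=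
  if ch = '-' then (st.1, st.2 + 1)
  else ((if st.2 > 0 then st.1 ++ [PySem.Int.toStr st.2] else st.1) ++ [String.ofList [ch]], 0)

-- A's post-loop flush: 'if count > 0: out.append(str(count))'
def aFinish (st : List String × Int) : List String :=
  if st.2 > 0 then st.1 ++ [PySem.Int.toStr st.2] else st.1

def convert_fen_back (fen : String) : String :=
  let out := aFinish (fen.toList.foldl aStep ([], 0))
  -- ''.join(out).split(' ')[0]: str.split with a separator always returns ≥ 1 piece, so [0] is the head
  ((PySem.Str.split? (PySem.Str.join "" out) " ").getD []).headD ""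

-- ===== PORT B =====
-- one loop step of B: board = board.replace('-' * n, str(n)); n comes from range(len(board),0,-1),
-- so n ≥ 1 and '.toNat' is exact for '-' * n
def bStage (board : String) (n : Int) : String :=
  PySem.Str.replace board (String.ofList (List.replicate n.toNat '-')) (PySem.Int.toStr n)

def convert_fen_back_alt (fen : String) : String :=
  -- board = fen.split(' ')[0]
  let board := ((PySem.Str.split? fen " ").getD []).headD ""
  -- for n in range(len(board), 0, -1): board = board.replace('-' * n, str(n))
  (PySem.List.pyRange (PySem.Str.len board) 0 (-1)).foldl bStage board

-- ===== PRECONDITION & SPEC =====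
def Spec_convert_fen_back (fen : String) (out : String) : Prop := out = convert_fen_back_alt fen
instance (fen : String) (out : String) : Decidable (Spec_convert_fen_back fen out) := by unfold Spec_convert_fen_back; infer_instance

-- ===== CLAIM =====
def Claim_equal_convert_fen_back : Prop := ∀ (fen : String), Dom_convert_fen_back fen → Spec_convert_fen_back fen (convert_fen_back fen)

-- ===== LEMMAS AND PROOFS =====

-- `stage k l`: dash runs of length > k compressed to their decimal, shorter runs kept.
-- stage 0 is full compression; stage l.length is the identity.
def stage (k : Nat) : List Char → List Char
  | [] => []
  | c :: cs =>
    if c = '-' then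
      (if k < 1 + (cs.takeWhile (· == '-')).length
       then PySem.Int.toChars ((1 + (cs.takeWhile (· == '-')).length : Nat) : Int)
       else List.replicate (1 + (cs.takeWhile (· == '-')).length) '-')
        ++ stage k (cs.dropWhile (· == '-'))
    else c :: stage k cs
termination_by l => l.length
decreasing_by
  · simpa using Nat.lt_succ_of_le (List.length_dropWhile_le _ _)
  · simp

-- B's replace at stage k: Chars.replace with pattern (k+1) dashes, de-fueled
def replS (k : Nat) : List Char → List Char
  | [] => []
  | c :: t =>
    if (List.replicate (k+1) '-').isPrefixOf (c :: t)
    then PySem.Int.toChars ((k+1 : Nat) : Int) ++ replS k (List.drop (k+1) (c :: t))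
    else c :: replS k t
termination_by l => l.length
decreasing_by
  · simp
  · simp

-- pending-flush of A's counter, char level
def flushC (n : Nat) : List Char := if 0 < n then PySem.Int.toChars (n : Int) else []

-- A's loop, written as the list of pieces it still has to append given a pending dash count
def fA : List Char → Nat → List String
  | [], n => if 0 < n then [PySem.Int.toStr (n : Int)] else []
  | c :: cs, n =>
    if c = '-' then fA cs (n + 1)
    else (if 0 < n then [PySem.Int.toStr (n : Int)] else []) ++ (String.ofList [c] :: fA cs 0)

theorem aStep_dash (out : List String) (n : Nat) :
    aStep (out, (n : Int)) '-' = (out, ((n + 1 : Nat) : Int)) := by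
  simp [aStep]

theorem aStep_other (out : List String) (n : Nat) (c : Char) (hc : c ≠ '-') :
    aStep (out, (n : Int)) c
      = (out ++ (if 0 < n then [PySem.Int.toStr (n : Int)] else []) ++ [String.ofList [c]],
         ((0 : Nat) : Int)) := by
  simp only [aStep, if_neg hc]
  by_cases h : 0 < n
  · simp [h, (by exact_mod_cast h : (0 : Int) < (n : Int))]
  · have h0 : n = 0 := by omega
    simp [h0]

theorem aFinish_cast (out : List String) (n : Nat) :
    aFinish (out, (n : Int)) = out ++ (if 0 < n then [PySem.Int.toStr (n : Int)] else []) := by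
  simp only [aFinish]
  by_cases h : 0 < n
  · simp [h, (by exact_mod_cast h : (0 : Int) < (n : Int))]
  · have h0 : n = 0 := by omega
    simp [h0]

theorem aStep_foldl (cs : List Char) (out : List String) (n : Nat) :
    aFinish (cs.foldl aStep (out, (n : Int))) = out ++ fA cs n := by
  induction cs generalizing out n with
  | nil => simpa [fA] using aFinish_cast out n
  | cons c cs ih =>
    by_cases hc : c = '-'
    · subst hc
      rw [List.foldl_cons, aStep_dash, ih, fA, if_pos rfl]
    · rw [List.foldl_cons, aStep_other out n c hc, ih, fA, if_neg hc]
      simp [List.append_assoc]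

-- digits facts
theorem toDigitsCore_mem (fuel n : Nat) (ds : List Char) (c : Char)
    (h : c ∈ Nat.toDigitsCore 10 fuel n ds) : c ∈ ds ∨ c.isDigit = true := by
  induction fuel generalizing n ds with
  | zero => rw [Nat.toDigitsCore] at h; exact Or.inl h
  | succ fuel ih =>
    have hd : (n % 10).digitChar.isDigit = true := by
      have h10 : n % 10 < 10 := Nat.mod_lt _ (by norm_num)
      set m := n % 10 with hm
      interval_cases m <;> decide
    rw [Nat.toDigitsCore] at h
    by_cases h0 : n / 10 = 0
    · simp only [h0, if_pos rfl] at h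
      rcases List.mem_cons.mp h with h | h
      · exact Or.inr (h ▸ hd)
      · exact Or.inl h
    · simp only [if_neg h0] at h
      rcases ih _ _ h with h | h
      · rcases List.mem_cons.mp h with h | h
        · exact Or.inr (h ▸ hd)
        · exact Or.inl h
      · exact Or.inr h

theorem toChars_nat_digit (m : Nat) (c : Char) (h : c ∈ PySem.Int.toChars (m : Int)) :
    c.isDigit = true := by
  simp only [PySem.Int.toChars] at h
  rw [if_neg (by exact_mod_cast Int.not_lt.mpr (Int.natCast_nonneg m))] at h
  rw [Int.toNat_natCast] at h
  rcases toDigitsCore_mem _ _ _ _ h with h | h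
  · simp at h
  · exact h

-- run decomposition facts
theorem takeWhile_dash_replicate (n : Nat) (cs : List Char) (h : cs.head? ≠ some '-') :
    (List.replicate n '-' ++ cs).takeWhile (· == '-') = List.replicate n '-' := by
  induction n with
  | zero =>
    cases cs with
    | nil => simp
    | cons c t =>
      have hc : c ≠ '-' := by intro hh; exact h (by simp [hh])
      simp [List.takeWhile_cons, hc]
  | succ n ih =>
    rw [List.replicate_succ, List.cons_append, List.takeWhile_cons]
    simp [ih]

theorem dropWhile_dash_replicate (n : Nat) (cs : List Char) (h : cs.head? ≠ some '-') :
    (List.replicate n '-' ++ cs).dropWhile (· == '-') = cs := by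
  induction n with
  | zero =>
    cases cs with
    | nil => simp
    | cons c t =>
      have hc : c ≠ '-' := by intro hh; exact h (by simp [hh])
      simp [List.dropWhile_cons, hc]
  | succ n ih =>
    rw [List.replicate_succ, List.cons_append, List.dropWhile_cons]
    simp [ih]

theorem takeWhile_dash_eq_replicate (cs : List Char) :
    cs.takeWhile (· == '-') = List.replicate (cs.takeWhile (· == '-')).length '-' := by
  apply List.eq_replicate_length.mpr
  intro b hb
  simpa using List.mem_takeWhile_imp hb

-- stage on a maximal leading dash run, full-compression case
theorem stage_zero_dash_run (n : Nat) (cs : List Char) (h : cs.head? ≠ some '-') :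
    stage 0 (List.replicate n '-' ++ cs) = flushC n ++ stage 0 cs := by
  cases n with
  | zero => simp [flushC]
  | succ n =>
    rw [List.replicate_succ, List.cons_append, stage, if_pos rfl,
      takeWhile_dash_replicate n cs h, dropWhile_dash_replicate n cs h]
    simp [flushC, List.length_replicate, Nat.add_comm]

-- stage is the identity past the length
theorem stage_of_length_le (k : Nat) (l : List Char) (h : l.length ≤ k) : stage k l = l := by
  induction l using stage.induct with
  | case1 => rw [stage]
  | case2 cs ih =>
    rw [stage, if_pos rfl,
      if_neg (by
        have := (List.takeWhile_prefix (l := cs) (· == '-')).length_le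
        simp at h; omega)]
    have ht := takeWhile_dash_eq_replicate cs
    calc List.replicate (1 + (cs.takeWhile (· == '-')).length) '-'
          ++ stage k (cs.dropWhile (· == '-'))
        = '-' :: (cs.takeWhile (· == '-') ++ stage k (cs.dropWhile (· == '-'))) := by
          rw [Nat.add_comm, List.replicate_succ]
          simp [← ht]
      _ = '-' :: cs := by
          rw [ih (by have := List.length_dropWhile_le (p := (· == '-')) (l := cs); simp at h; omega)]
          rw [List.takeWhile_append_dropWhile]
  | case3 c cs hc ih =>
    rw [stage, if_neg hc, ih (by simp at h; omega)]

-- chars of a stage are chars of the input or digits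
theorem mem_stage (k : Nat) (l : List Char) (c : Char) (h : c ∈ stage k l) :
    c ∈ l ∨ c.isDigit = true := by
  induction l using stage.induct with
  | case1 => rw [stage] at h; simp at h
  | case2 cs ih =>
    rw [stage, if_pos rfl] at h
    rcases List.mem_append.mp h with h | h
    · by_cases hk : k < 1 + (cs.takeWhile (· == '-')).length
      · rw [if_pos hk] at h
        exact Or.inr (toChars_nat_digit _ _ h)
      · rw [if_neg hk] at h
        have := List.eq_of_mem_replicate h
        exact Or.inl (by simp [this])
    · rcases ih h with h | h
      · exact Or.inl (List.mem_cons_of_mem _ ((List.dropWhile_sublist _).mem h))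
      · exact Or.inr h
  | case3 c' cs hc ih =>
    rw [stage, if_neg hc] at h
    rcases List.mem_cons.mp h with h | h
    · exact Or.inl (h ▸ List.mem_cons_self)
    · rcases ih h with h | h
      · exact Or.inl (List.mem_cons_of_mem _ h)
      · exact Or.inr h

theorem stage_head_ne_dash (k : Nat) (l : List Char) (h : l.head? ≠ some '-') :
    (stage k l).head? ≠ some '-' := by
  cases l with
  | nil => rw [stage]; simp
  | cons c cs =>
    have hc : c ≠ '-' := by intro hh; exact h (by simp [hh])
    rw [stage, if_neg hc]
    simpa using hc

-- replS skips non-dash characters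
theorem replS_cons_ne (k : Nat) (c : Char) (t : List Char) (hc : c ≠ '-') :
    replS k (c :: t) = c :: replS k t := by
  rw [replS, if_neg]
  rw [List.replicate_succ]
  simp [List.isPrefixOf, Ne.symm hc]

theorem replS_append_no_dash (k : Nat) (xs Y : List Char) (h : ∀ c ∈ xs, c ≠ '-') :
    replS k (xs ++ Y) = xs ++ replS k Y := by
  induction xs with
  | nil => simp
  | cons x xs ih =>
    rw [List.cons_append, replS_cons_ne k x _ (h x List.mem_cons_self),
      ih (fun c hc => h c (List.mem_cons_of_mem _ hc))]
    simp

theorem not_prefixOf_short_run (m r : Nat) (Y : List Char) (hr : r < m)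
    (hY : Y.head? ≠ some '-') :
    (List.replicate m '-').isPrefixOf (List.replicate r '-' ++ Y) = false := by
  induction r generalizing m with
  | zero =>
    cases m with
    | zero => omega
    | succ m =>
      rw [List.replicate_succ]
      cases Y with
      | nil => simp [List.isPrefixOf]
      | cons y ys =>
        have hy : y ≠ '-' := by intro hh; exact hY (by simp [hh])
        simp [List.isPrefixOf, Ne.symm hy]
  | succ r ih =>
    cases m with
    | zero => omega
    | succ m =>
      rw [List.replicate_succ, List.replicate_succ (n := r), List.cons_append]
      simpa [List.isPrefixOf] using ih m (by omega)

theorem replS_short_run (k r : Nat) (Y : List Char) (hr : r ≤ k) (hY : Y.head? ≠ some '-') :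
    replS k (List.replicate r '-' ++ Y) = List.replicate r '-' ++ replS k Y := by
  induction r with
  | zero => simp
  | succ r ih =>
    rw [List.replicate_succ, List.cons_append, replS,
      if_neg (by
        have := not_prefixOf_short_run (k+1) (r+1) Y (by omega) hY
        rw [List.replicate_succ (n := r), List.cons_append] at this
        simp [this]),
      ih (by omega)]
    simp

theorem replS_hit (k : Nat) (Y : List Char) :
    replS k (List.replicate (k+1) '-' ++ Y)
      = PySem.Int.toChars ((k+1 : Nat) : Int) ++ replS k Y := by
  have hpre : (List.replicate (k+1) '-').isPrefixOf ('-' :: (List.replicate k '-' ++ Y)) = true := by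
    rw [← List.cons_append, ← List.replicate_succ]
    exact List.isPrefixOf_iff_prefix.mpr (List.prefix_append _ _)
  have hdrop : List.drop (k+1) ('-' :: (List.replicate k '-' ++ Y)) = Y := by
    rw [← List.cons_append, ← List.replicate_succ]
    have := List.drop_left (l₁ := List.replicate (k+1) '-') (l₂ := Y)
    simpa using this
  rw [List.replicate_succ, List.cons_append, replS, if_pos hpre, hdrop]

-- replace = replS (fuel adequacy)
theorem replace_go_eq_replS (k : Nat) (fuel : Nat) (l acc : List Char) (h : l.length ≤ fuel) :
    PySem.Chars.replace.go (List.replicate (k+1) '-') (PySem.Int.toChars ((k+1 : Nat) : Int))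
        fuel l acc
      = acc.reverse ++ replS k l := by
  induction fuel generalizing l acc with
  | zero =>
    have hl : l = [] := by cases l <;> simp_all
    subst hl
    simp [PySem.Chars.replace.go, replS]
  | succ fuel ih =>
    cases l with
    | nil => simp [PySem.Chars.replace.go, replS]
    | cons c t =>
      rw [PySem.Chars.replace.go, replS, List.length_replicate]
      by_cases hp : (List.replicate (k+1) '-').isPrefixOf (c :: t) = true
      · rw [if_pos hp, if_pos hp, ih _ _ (by simp at h ⊢; omega)]
        simp
      · rw [if_neg hp, if_neg hp, ih _ _ (by simp at h ⊢; omega)]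
        simp

theorem replace_eq_replS (k : Nat) (l : List Char) :
    PySem.Chars.replace l (List.replicate (k+1) '-') (PySem.Int.toChars ((k+1 : Nat) : Int))
      = replS k l := by
  rw [PySem.Chars.replace,
    if_neg (by rw [List.replicate_succ]; simp),
    replace_go_eq_replS k l.length l [] le_rfl]
  simp

-- one substitution stage: replacing (k+1)-dash runs turns stage (k+1) into stage k
theorem replS_stage (k : Nat) (l : List Char) : replS k (stage (k+1) l) = stage k l := by
  induction l using stage.induct with
  | case1 => rw [stage, stage, replS]
  | case2 cs ih =>
    have hrest : (cs.dropWhile (· == '-')).head? ≠ some '-' := by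
      intro heq
      have hmatch := List.head?_dropWhile_not (· == '-') cs
      rw [heq] at hmatch
      simp at hmatch
    have hY : (stage (k+1) (cs.dropWhile (· == '-'))).head? ≠ some '-' :=
      stage_head_ne_dash _ _ hrest
    rw [stage, if_pos rfl, stage, if_pos rfl]
    by_cases h1 : k + 1 < 1 + (cs.takeWhile (· == '-')).length
    · rw [if_pos h1, if_pos (by omega),
        replS_append_no_dash k _ _ (fun c hc => by
          intro hdash
          have := toChars_nat_digit _ _ hc
          rw [hdash] at this
          simp at this),
        ih]
    · by_cases h2 : 1 + (cs.takeWhile (· == '-')).length = k + 1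
      · rw [if_neg h1, h2, if_pos (by omega), replS_hit, ih]
      · rw [if_neg h1, if_neg (by omega),
          replS_short_run k _ _ (by omega) hY, ih]
  | case3 c cs hc ih =>
    rw [stage, if_neg hc, stage, if_neg hc, replS_cons_ne k c _ hc, ih]

-- the A-side join equals full compression
theorem intercalate_nil (L : List (List Char)) : List.intercalate [] L = L.flatten := by
  induction L with
  | nil => simp [List.intercalate]
  | cons x L ih =>
    cases L with
    | nil => simp [List.intercalate]
    | cons y L' =>
      rw [List.intercalate, List.intersperse_cons₂] at *
      simp_all [List.intercalate]

theorem fA_flatten (cs : List Char) (n : Nat) :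
    ((fA cs n).map String.toList).flatten = stage 0 (List.replicate n '-' ++ cs) := by
  induction cs generalizing n with
  | nil =>
    rw [fA, stage_zero_dash_run n [] (by simp), stage]
    by_cases h : 0 < n <;> simp [h, flushC, PySem.Int.toList_toStr]
  | cons c cs ih =>
    by_cases hc : c = '-'
    · subst hc
      rw [fA, if_pos rfl, ih (n+1), List.replicate_succ' (n := n)]
      simp [List.append_assoc]
    · rw [fA, if_neg hc,
        stage_zero_dash_run n (c :: cs) (by simpa using hc), stage, if_neg hc]
      have h0 := ih 0
      simp only [List.replicate, List.nil_append] at h0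
      by_cases h : 0 < n <;>
        simp [h, flushC, PySem.Int.toList_toStr, h0]

-- split(' ')[0] is takeWhile (≠ ' ')
theorem splitOn_go_acc (sep : List Char) (fuel : Nat) (l cur : List Char)
    (acc : List (List Char)) :
    PySem.Chars.splitOn.go sep fuel l cur acc
      = acc.reverse ++ PySem.Chars.splitOn.go sep fuel l cur [] := by
  induction fuel generalizing l cur acc with
  | zero => simp [PySem.Chars.splitOn.go]
  | succ fuel ih =>
    cases l with
    | nil => simp [PySem.Chars.splitOn.go]
    | cons c rest =>
      rw [PySem.Chars.splitOn.go, PySem.Chars.splitOn.go]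
      by_cases hp : sep.isPrefixOf (c :: rest) = true
      · rw [if_pos hp, if_pos hp, ih _ _ (cur.reverse :: acc), ih _ _ [cur.reverse]]
        simp
      · rw [if_neg hp, if_neg hp, ih _ _ acc]

theorem splitOn_go_head (fuel : Nat) (l cur : List Char) (h : l.length ≤ fuel) :
    ∃ tp, PySem.Chars.splitOn.go [' '] fuel l cur []
      = (cur.reverse ++ l.takeWhile (· ≠ ' ')) :: tp := by
  induction fuel generalizing l cur with
  | zero =>
    have hl : l = [] := by cases l <;> simp_all
    subst hl
    exact ⟨[], by simp [PySem.Chars.splitOn.go]⟩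
  | succ fuel ih =>
    cases l with
    | nil =>
      exact ⟨[], by simp [PySem.Chars.splitOn.go]⟩
    | cons c rest =>
      rw [PySem.Chars.splitOn.go]
      by_cases hc : c = ' '
      · subst hc
        rw [if_pos (by simp [List.isPrefixOf])]
        rw [splitOn_go_acc [' '] fuel _ [] [List.reverse cur]]
        exact ⟨PySem.Chars.splitOn.go [' '] fuel (List.drop 1 (' ' :: rest)) [] [],
          by simp [List.takeWhile_cons]⟩
      · rw [if_neg (by simp [List.isPrefixOf, Ne.symm hc])]
        obtain ⟨tp, htp⟩ := ih rest (c :: cur) (by simp at h ⊢; omega)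
        refine ⟨tp, ?_⟩
        rw [htp]
        simp [List.takeWhile_cons, hc]

theorem split_head_toList (s : String) :
    (((PySem.Str.split? s " ").getD []).headD "").toList = s.toList.takeWhile (· ≠ ' ') := by
  have hmap := PySem.Str.split?_map s " "
  have hsep : (" " : String).toList = [' '] := by decide
  rw [hsep] at hmap
  obtain ⟨tp, htp⟩ := splitOn_go_head (s.toList.length + 1) s.toList [] (by omega)
  have hsplit : PySem.Chars.split? s.toList [' ']
      = some ((s.toList.takeWhile (· ≠ ' ')) :: tp) := by
    rw [PySem.Chars.split?, if_neg (by simp), PySem.Chars.splitOn, htp]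
    simp
  rw [hsplit] at hmap
  cases hsp : PySem.Str.split? s " " with
  | none => rw [hsp] at hmap; simp at hmap
  | some L =>
    rw [hsp] at hmap
    simp only [Option.map_some, Option.some_inj] at hmap
    cases L with
    | nil => simp at hmap
    | cons l0 ls =>
      simp only [List.map_cons, List.cons.injEq] at hmap
      simp [hmap.1]

-- compression commutes with cutting at the first space
theorem stage_zero_append_space (u v : List Char) :
    stage 0 (u ++ ' ' :: v) = stage 0 u ++ ' ' :: stage 0 v := by
  induction u using stage.induct with
  | case1 =>
    have h0 : stage 0 ([] : List Char) = [] := by rw [stage]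
    rw [List.nil_append, h0, List.nil_append, stage,
      if_neg (show ¬(' ' = '-') by decide)]
  | case2 cs ih =>
    have htw : (cs ++ ' ' :: v).takeWhile (· == '-') = cs.takeWhile (· == '-') := by
      rw [List.takeWhile_append]
      split_ifs with hlen
      · rw [(List.takeWhile_prefix _).eq_of_length hlen]
        simp [List.takeWhile_cons]
      · rfl
    have hdw : (cs ++ ' ' :: v).dropWhile (· == '-') = cs.dropWhile (· == '-') ++ ' ' :: v := by
      rw [List.dropWhile_append]
      split_ifs with hemp
      · rw [List.isEmpty_iff.mp hemp]
        simp [List.dropWhile_cons]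
      · rfl
    rw [List.cons_append, stage, if_pos rfl, htw, hdw, ih, stage, if_pos rfl]
    simp [List.append_assoc]
  | case3 c cs hc ih =>
    rw [List.cons_append, stage, if_neg hc, ih, stage, if_neg hc]
    rfl

theorem takeWhile_stage_zero (s : List Char) :
    (stage 0 s).takeWhile (· ≠ ' ') = stage 0 (s.takeWhile (· ≠ ' ')) := by
  have hu : ∀ c ∈ stage 0 (s.takeWhile (· ≠ ' ')), (decide (c ≠ ' ')) = true := by
    intro c hc
    rcases mem_stage _ _ _ hc with h | h
    · simpa using List.mem_takeWhile_imp h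
    · simp only [decide_eq_true_eq]
      intro heq
      rw [heq] at h
      simp at h
  have hself : (stage 0 (s.takeWhile (· ≠ ' '))).takeWhile (· ≠ ' ')
      = stage 0 (s.takeWhile (· ≠ ' ')) := List.takeWhile_eq_self_iff.mpr hu
  cases hdw : s.dropWhile (· ≠ ' ') with
  | nil =>
    have hs : s.takeWhile (· ≠ ' ') = s := by
      have := List.takeWhile_append_dropWhile (p := (· ≠ ' ')) (l := s)
      rw [hdw, List.append_nil] at this
      rw [this]
    rw [hs] at hself ⊢
    exact hself
  | cons c v =>
    have hc : c = ' ' := by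
      have hmatch := List.head?_dropWhile_not (· ≠ ' ') s
      rw [hdw] at hmatch
      simpa using hmatch
    have hs : s = s.takeWhile (· ≠ ' ') ++ ' ' :: v := by
      conv_lhs => rw [← List.takeWhile_append_dropWhile (p := (· ≠ ' ')) (l := s), hdw, hc]
    conv_lhs => rw [hs]
    rw [stage_zero_append_space, List.takeWhile_append]
    rw [if_pos (by rw [hself])]
    rw [List.takeWhile_cons]
    simp

-- the B-side loop
theorem pyRange_desc (n : Nat) :
    PySem.List.pyRange (n : Int) 0 (-1)
      = (List.range n).map (fun k => ((n - k : Nat) : Int)) := by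
  rw [PySem.List.pyRange]
  cases n with
  | zero => simp
  | succ m =>
    rw [if_neg (by norm_num)]
    have hcount : ((((m+1 : Nat) : Int) - 0 + -(-1) - 1) / -(-1)).toNat = m + 1 := by
      push_cast
      norm_num
    rw [if_neg (by norm_num), if_pos (by push_cast; omega), hcount]
    apply List.map_congr_left
    intro k hk
    have hk' : k < m + 1 := List.mem_range.mp hk
    push_cast [Nat.cast_sub (by omega : k ≤ m + 1)]
    ring

theorem desc_succ (m : Nat) :
    (List.range (m+1)).map (fun k => ((m + 1 - k : Nat) : Int))
      = ((m + 1 : Nat) : Int) :: (List.range m).map (fun k => ((m - k : Nat) : Int)) := by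
  rw [List.range_succ_eq_map, List.map_cons, List.map_map]
  simp [Nat.succ_sub_succ, Function.comp_def]

theorem bStage_toList (s : String) (n : Int) :
    (bStage s n).toList
      = PySem.Chars.replace s.toList (List.replicate n.toNat '-') (PySem.Int.toChars n) := by
  simp [bStage, PySem.Str.replace, PySem.Int.toList_toStr]

theorem foldl_bStage_toList (L : List Int) (s : String) :
    ((L.foldl bStage s)).toList
      = L.foldl
          (fun cs n => PySem.Chars.replace cs (List.replicate n.toNat '-') (PySem.Int.toChars n))
          s.toList := by
  induction L generalizing s with
  | nil => simp
  | cons n L ih =>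
    rw [List.foldl_cons, List.foldl_cons, ih, bStage_toList]

theorem fold_desc_stage (m : Nat) (u : List Char) :
    ((List.range m).map (fun k => ((m - k : Nat) : Int))).foldl
        (fun cs n => PySem.Chars.replace cs (List.replicate n.toNat '-') (PySem.Int.toChars n))
        (stage m u)
      = stage 0 u := by
  induction m with
  | zero => simp
  | succ m ih =>
    rw [desc_succ, List.foldl_cons]
    have hstep : PySem.Chars.replace (stage (m+1) u)
        (List.replicate (((m + 1 : Nat) : Int)).toNat '-')
        (PySem.Int.toChars ((m + 1 : Nat) : Int)) = stage m u := by
      rw [Int.toNat_natCast, replace_eq_replS, replS_stage]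
    rw [hstep, ih]

theorem alt_toList (fen : String) :
    (convert_fen_back_alt fen).toList = stage 0 (fen.toList.takeWhile (· ≠ ' ')) := by
  show ((PySem.List.pyRange
      (PySem.Str.len (((PySem.Str.split? fen " ").getD []).headD "")) 0 (-1)).foldl bStage
      (((PySem.Str.split? fen " ").getD []).headD "")).toList = _
  set board := ((PySem.Str.split? fen " ").getD []).headD "" with hb
  have hbt : board.toList = fen.toList.takeWhile (· ≠ ' ') := split_head_toList fen
  have hlen : PySem.Str.len board = (board.toList.length : Int) := by
    simp [PySem.Str.len]
  rw [hlen, pyRange_desc, foldl_bStage_toList, hbt]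
  have key := fold_desc_stage (fen.toList.takeWhile (· ≠ ' ')).length
    (fen.toList.takeWhile (· ≠ ' '))
  rwa [stage_of_length_le _ _ le_rfl] at key

theorem a_toList (fen : String) :
    (convert_fen_back fen).toList = stage 0 (fen.toList.takeWhile (· ≠ ' ')) := by
  show ((((PySem.Str.split?
      (PySem.Str.join "" (aFinish (fen.toList.foldl aStep ([], 0)))) " ").getD
      []).headD "")).toList = _
  rw [split_head_toList]
  have hfold : aFinish (fen.toList.foldl aStep ([], 0)) = fA fen.toList 0 := by
    have := aStep_foldl fen.toList [] 0
    simpa using this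
  have hjoin : (PySem.Str.join "" (fA fen.toList 0)).toList
      = stage 0 fen.toList := by
    rw [PySem.Str.toList_join]
    have hsep : ("" : String).toList = [] := by decide
    rw [hsep]
    show PySem.Chars.join [] _ = _
    rw [PySem.Chars.join, intercalate_nil]
    have := fA_flatten fen.toList 0
    simpa using this
  rw [hfold, hjoin, takeWhile_stage_zero]

-- ===== VERDICT =====
theorem convert_fen_back_spec : Claim_equal_convert_fen_back := by
  intro fen _
  unfold Spec_convert_fen_back
  rw [← String.toList_inj, a_toList, alt_toList]
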